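-- pv_equiv track=rewrite | github.com/hooong/2019-blind-2nd-elevator | example/1.py | is_top
-- ===== SOURCE A (Python) =====
-- def is_top(calls, passengers, floor):
--     top = -1
--     for call in calls:
--         top = max(top, call['start'])
--     for passenger in passengers:
--         top = max(top, passenger['end'])
--
--     if floor >= top:
--         return True
--     else:
--         return False
-- ===== SOURCE B (Python) =====
-- def is_top(calls, passengers, floor):
--     needs = sorted([c['start'] for c in calls] + [p['end'] for p in passengers],
--                    reverse=True)
--     return not needs or floor >= needs[0]
-- ===== Notes on version B (the rewrite author's own statement) =====
-- stated objective: alternative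
-- what changed: Instead of folding both lists through a running-max accumulator seeded with -1 and comparing once at the end, B materialises the combined list of requested floors, sorts it in descending order and compares floor only to its head (empty list means no requirement).
-- intended difference: When floor < -1 yet every call start and passenger end is <= floor, A returns False only because of its artificial -1 seed for the running max, while B returns True, the intended answer since the elevator floor is at or above every requested floor. — e.g. on is_top([[("start", -5)]], [], -3): A returns false, B returns true
import Mathlib
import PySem

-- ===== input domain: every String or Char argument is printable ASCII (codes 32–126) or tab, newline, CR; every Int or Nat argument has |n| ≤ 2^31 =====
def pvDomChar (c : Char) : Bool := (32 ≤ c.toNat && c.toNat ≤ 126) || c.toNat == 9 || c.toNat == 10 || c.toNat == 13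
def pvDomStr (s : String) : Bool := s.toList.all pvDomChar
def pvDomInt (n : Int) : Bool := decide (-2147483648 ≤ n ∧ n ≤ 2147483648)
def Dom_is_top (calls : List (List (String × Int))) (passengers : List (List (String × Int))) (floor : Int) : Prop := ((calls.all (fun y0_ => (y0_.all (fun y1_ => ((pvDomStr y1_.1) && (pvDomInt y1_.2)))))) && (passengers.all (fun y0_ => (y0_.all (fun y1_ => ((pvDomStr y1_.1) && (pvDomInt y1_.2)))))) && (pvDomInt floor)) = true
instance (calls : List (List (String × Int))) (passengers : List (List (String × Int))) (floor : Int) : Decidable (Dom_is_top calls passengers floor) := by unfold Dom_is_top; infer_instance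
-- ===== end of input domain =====

-- B replaces A's running-max fold with: build the combined list of requested floors, sort it
-- descending, compare floor to its head (objective: alternative). Intended difference D_:
-- A's -1 seed makes it answer False whenever floor < -1 even though every requested floor is
-- ≤ floor; B answers True there.


-- ===== PORT A =====
-- call['start'] / passenger['end'] (KeyError when absent is excluded by Pre_; getD 0 is never
-- the taken branch under Pre_)
def pvStart (call : List (String × Int)) : Int := ((PySem.Dict.mk call).get? "start").getD 0
def pvEnd (passenger : List (String × Int)) : Int := ((PySem.Dict.mk passenger).get? "end").getD 0

def is_top (calls : List (List (String × Int))) (passengers : List (List (String × Int))) (floor : Int) : Bool :=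
  let top : Int := -1
  let top := calls.foldl (fun top call => max top (pvStart call)) top
  let top := passengers.foldl (fun top passenger => max top (pvEnd passenger)) top
  if floor ≥ top then true else false

-- ===== PORT B =====
-- sorted(vals, reverse=True); 'not needs or floor >= needs[0]' ported as the match on the head
def is_top_alt (calls : List (List (String × Int))) (passengers : List (List (String × Int))) (floor : Int) : Bool :=
  let needs := PySem.List.sorted (calls.map pvStart ++ passengers.map pvEnd) (fun x => x) true
  match needs with
  | [] => true
  | m :: _ => floor ≥ m

-- ===== PRECONDITION & SPEC =====
-- Pre_ excludes exactly the inputs where Python A raises KeyError: a call without a 'start'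
-- key or a passenger without an 'end' key.
def Pre_is_top (calls : List (List (String × Int))) (passengers : List (List (String × Int))) (floor : Int) : Prop :=
  (∀ call ∈ calls, ((PySem.Dict.mk call).get? "start").isSome) ∧
  (∀ passenger ∈ passengers, ((PySem.Dict.mk passenger).get? "end").isSome)
instance (calls : List (List (String × Int))) (passengers : List (List (String × Int))) (floor : Int) : Decidable (Pre_is_top calls passengers floor) := by unfold Pre_is_top; infer_instance
def pvWitness_is_top : (List (List (String × Int))) × (List (List (String × Int))) × Int :=
  ([[("start", 2)]], [[("end", 5)]], 5)

-- When floor < -1 yet every call start and passenger end is ≤ floor, A returns False only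
-- because of its artificial -1 seed for the running max, while B returns True, the intended
-- answer since the elevator floor is at or above every requested floor.
def D_is_top (calls : List (List (String × Int))) (passengers : List (List (String × Int))) (floor : Int) : Prop :=
  floor < -1 ∧
  (∀ call ∈ calls, ∃ v, (PySem.Dict.mk call).get? "start" = some v ∧ v ≤ floor) ∧
  (∀ passenger ∈ passengers, ∃ v, (PySem.Dict.mk passenger).get? "end" = some v ∧ v ≤ floor)
instance (calls : List (List (String × Int))) (passengers : List (List (String × Int))) (floor : Int) : Decidable (D_is_top calls passengers floor) := by unfold D_is_top; infer_instance

def Spec_is_top (calls : List (List (String × Int))) (passengers : List (List (String × Int))) (floor : Int) (out : Bool) : Prop := ¬ D_is_top calls passengers floor → out = is_top_alt calls passengers floor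
instance (calls : List (List (String × Int))) (passengers : List (List (String × Int))) (floor : Int) (out : Bool) : Decidable (Spec_is_top calls passengers floor out) := by unfold Spec_is_top; infer_instance

def pvDiffWitness_is_top : (List (List (String × Int))) × (List (List (String × Int))) × Int :=
  ([[("start", -5)]], [], -3)
def pvDiffWitnessOut_is_top : Bool × Bool := (false, true)

-- ===== CLAIM (what is proved, stated in full; the proofs are below) =====
def Claim_unchanged_is_top : Prop := ∀ (calls : List (List (String × Int))) (passengers : List (List (String × Int))) (floor : Int), Dom_is_top calls passengers floor → Pre_is_top calls passengers floor → Spec_is_top calls passengers floor (is_top calls passengers floor)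
def Claim_changed_is_top : Prop := Dom_is_top (pvDiffWitness_is_top.1) (pvDiffWitness_is_top.2.1) (pvDiffWitness_is_top.2.2) ∧ Pre_is_top (pvDiffWitness_is_top.1) (pvDiffWitness_is_top.2.1) (pvDiffWitness_is_top.2.2) ∧ D_is_top (pvDiffWitness_is_top.1) (pvDiffWitness_is_top.2.1) (pvDiffWitness_is_top.2.2) ∧ is_top (pvDiffWitness_is_top.1) (pvDiffWitness_is_top.2.1) (pvDiffWitness_is_top.2.2) = pvDiffWitnessOut_is_top.1 ∧ is_top_alt (pvDiffWitness_is_top.1) (pvDiffWitness_is_top.2.1) (pvDiffWitness_is_top.2.2) = pvDiffWitnessOut_is_top.2 ∧ pvDiffWitnessOut_is_top.1 ≠ pvDiffWitnessOut_is_top.2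
def Claim_exact_is_top : Prop := ∀ (calls : List (List (String × Int))) (passengers : List (List (String × Int))) (floor : Int), Dom_is_top calls passengers floor → Pre_is_top calls passengers floor → D_is_top calls passengers floor → is_top calls passengers floor ≠ is_top_alt calls passengers floor

-- ===== LEMMAS AND PROOFS =====
-- floor dominates a running max of f over l iff it dominates the seed and every element.
theorem foldl_max_le_iff (l : List (List (String × Int))) (f : List (String × Int) → Int)
    (init floor : Int) :
    (l.foldl (fun t x => max t (f x)) init ≤ floor) ↔ (init ≤ floor ∧ ∀ x ∈ l, f x ≤ floor) := by
  induction l generalizing init with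
  | nil => simp
  | cons a l ih =>
    simp only [List.foldl_cons, ih, max_le_iff, List.mem_cons]
    constructor
    · rintro ⟨⟨h1, h2⟩, h3⟩; exact ⟨h1, fun x hx => by rcases hx with rfl | hx; exact h2; exact h3 x hx⟩
    · rintro ⟨h1, h2⟩; exact ⟨⟨h1, h2 a (Or.inl rfl)⟩, fun x hx => h2 x (Or.inr hx)⟩

theorem is_top_true_iff (calls passengers : List (List (String × Int))) (floor : Int) :
    is_top calls passengers floor = true ↔
      (-1 ≤ floor ∧ (∀ c ∈ calls, pvStart c ≤ floor) ∧ (∀ p ∈ passengers, pvEnd p ≤ floor)) := by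
  unfold is_top
  simp only [ge_iff_le, Bool.if_true_left]
  constructor
  · intro h
    have h' : passengers.foldl (fun t p => max t (pvEnd p)) (calls.foldl (fun t c => max t (pvStart c)) (-1)) ≤ floor := by
      by_contra hc; simp [hc] at h
    rw [foldl_max_le_iff, foldl_max_le_iff] at h'
    exact ⟨h'.1.1, h'.1.2, h'.2⟩
  · rintro ⟨h1, h2, h3⟩
    have : passengers.foldl (fun t p => max t (pvEnd p)) (calls.foldl (fun t c => max t (pvStart c)) (-1)) ≤ floor := by
      rw [foldl_max_le_iff, foldl_max_le_iff]; exact ⟨⟨h1, h2⟩, h3⟩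
    simp [this]

-- B is true iff floor dominates every requested floor: by the sort's order, every element of
-- the combined list is ≤ the head of its descending sort, and the head itself is a member.
theorem is_top_alt_true_iff (calls passengers : List (List (String × Int))) (floor : Int) :
    is_top_alt calls passengers floor = true ↔
      ((∀ c ∈ calls, pvStart c ≤ floor) ∧ (∀ p ∈ passengers, pvEnd p ≤ floor)) := by
  unfold is_top_alt
  set vals := calls.map pvStart ++ passengers.map pvEnd with hvals
  have hmem_iff : (∀ v ∈ vals, v ≤ floor) ↔
      ((∀ c ∈ calls, pvStart c ≤ floor) ∧ (∀ p ∈ passengers, pvEnd p ≤ floor)) := by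
    rw [hvals]
    constructor
    · intro h
      exact ⟨fun c hc => h _ (List.mem_append_left _ (List.mem_map_of_mem hc)),
             fun p hp => h _ (List.mem_append_right _ (List.mem_map_of_mem hp))⟩
    · rintro ⟨h1, h2⟩ v hv
      rcases List.mem_append.mp hv with h | h <;> obtain ⟨x, hx, rfl⟩ := List.mem_map.mp h
      · exact h1 x hx
      · exact h2 x hx
  rw [← hmem_iff]
  rcases hs : PySem.List.sorted vals (fun x => x) true with _ | ⟨m, t⟩
  · have : vals = [] := (PySem.List.sorted_eq_nil_iff vals (fun x => x) true).mp hs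
    simp [this]
  · simp only [decide_eq_true_eq, ge_iff_le]
    constructor
    · intro hm v hv
      have := PySem.List.key_head_sorted_rev_ge (xs := vals) (key := fun x => x) hs v hv
      simp only [] at this
      omega
    · intro hall
      have hmm : m ∈ vals := by
        rw [← PySem.List.mem_sorted (key := fun x => x) (rev := true), hs]; exact List.mem_cons_self
      exact hall m hmm

-- ===== VERDICT (by name: the statement is the Claim_ definition above) =====
theorem is_top_spec : Claim_unchanged_is_top := by
  intro calls passengers floor _ hpre hnd
  rcases hpre with ⟨hc, hp⟩
  rw [Bool.eq_iff_iff, is_top_true_iff, is_top_alt_true_iff]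
  constructor
  · rintro ⟨_, h2, h3⟩; exact ⟨h2, h3⟩
  · rintro ⟨h2, h3⟩
    refine ⟨?_, h2, h3⟩
    by_contra hlt
    push Not at hlt
    apply hnd
    refine ⟨by omega, ?_, ?_⟩
    · intro c hcmem
      obtain ⟨v, hv⟩ := Option.isSome_iff_exists.mp (hc c hcmem)
      exact ⟨v, hv, by have := h2 c hcmem; simp [pvStart, hv] at this; exact this⟩
    · intro p hpmem
      obtain ⟨v, hv⟩ := Option.isSome_iff_exists.mp (hp p hpmem)
      exact ⟨v, hv, by have := h3 p hpmem; simp [pvEnd, hv] at this; exact this⟩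

theorem is_top_changed : Claim_changed_is_top := by unfold Claim_changed_is_top; decide

theorem is_top_tight : Claim_exact_is_top := by
  intro calls passengers floor _ _ hd
  rcases hd with ⟨hfl, hc, hp⟩
  have hb : is_top_alt calls passengers floor = true := by
    rw [is_top_alt_true_iff]
    constructor
    · intro c hm; obtain ⟨v, hv, hle⟩ := hc c hm; simp [pvStart, hv]; exact hle
    · intro p hm; obtain ⟨v, hv, hle⟩ := hp p hm; simp [pvEnd, hv]; exact hle
  have ha : is_top calls passengers floor ≠ true := by
    intro h; rw [is_top_true_iff] at h; omega
  simp [hb, ha]
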